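-- pv_equiv track=rewrite | github.com/Mohit-Kundu/MarketVantage | src/marketvantage/rag_app.py | _split_markdown_blocks
-- ===== SOURCE A (Python) =====
-- from typing import Any, Dict, List, Tuple
--
-- def _split_markdown_blocks(md: str) -> List[str]:
--     # Preserve code fences as atomic blocks, and split by headings
--     if not md:
--         return []
--     lines = md.splitlines()
--     blocks: List[str] = []
--     buf: List[str] = []
--     in_code = False
--     fence = ""
--     for l in lines:
--         if l.strip().startswith("```"):
--             if not in_code:
--                 # start fence – flush current buffer as a block
--                 if buf:
--                     blocks.append("\n".join(buf).strip())
--                     buf = []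
--                 in_code = True
--                 fence = l.strip()
--                 buf.append(l)
--                 continue
--             else:
--                 buf.append(l)
--                 blocks.append("\n".join(buf).strip())
--                 buf = []
--                 in_code = False
--                 fence = ""
--                 continue
--         if not in_code and l.startswith(("# ", "## ", "### ")):
--             # heading boundary
--             if buf:
--                 blocks.append("\n".join(buf).strip())
--                 buf = []
--             buf.append(l)
--         else:
--             buf.append(l)
--     if buf:
--         blocks.append("\n".join(buf).strip())
--     # Remove empties
--     return [b for b in blocks if b]
-- ===== SOURCE B (Python) =====
-- from typing import List
--
--
-- def _split_markdown_blocks(md: str) -> List[str]: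
--     if not md:
--         return []
--     lines = md.splitlines()
--
--     def is_fence(l):
--         return l.strip().startswith("```")
--
--     # Phase 1: partition the lines into maximal code / text segments.
--     segments = []
--     i, n = 0, len(lines)
--     while i < n:
--         if is_fence(lines[i]):
--             j = i + 1
--             while j < n and not is_fence(lines[j]):
--                 j += 1
--             if j < n:
--                 segments.append((True, lines[i:j + 1]))
--                 i = j + 1
--             else:
--                 segments.append((True, lines[i:]))
--                 i = n
--         else:
--             j = i + 1
--             while j < n and not is_fence(lines[j]):
--                 j += 1
--             segments.append((False, lines[i:j]))
--             i = j
--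
--     # Phase 2: code segments are atomic; text segments split at headings.
--     candidates = []
--     for is_code, seg in segments:
--         if is_code:
--             candidates.append(seg)
--         else:
--             acc, cur = [], []
--             for l in seg:
--                 if l.startswith(("# ", "## ", "### ")) and cur:
--                     acc.append(cur)
--                     cur = [l]
--                 else:
--                     cur.append(l)
--             if cur:
--                 acc.append(cur)
--             candidates.extend(acc)
--
--     blocks = ["\n".join(c).strip() for c in candidates]
--     return [b for b in blocks if b]
-- ===== Notes on version B (the rewrite author's own statement) =====
-- stated objective: alternative
-- what changed: A is a single line-by-line state machine with an in_code flag and a shared buffer; B first partitions the lines into maximal code/text segments (two-pointer scans), then splits only the text segments at headings, and finally joins/strips/filters each candidate block in one separate pass.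
import Mathlib
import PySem

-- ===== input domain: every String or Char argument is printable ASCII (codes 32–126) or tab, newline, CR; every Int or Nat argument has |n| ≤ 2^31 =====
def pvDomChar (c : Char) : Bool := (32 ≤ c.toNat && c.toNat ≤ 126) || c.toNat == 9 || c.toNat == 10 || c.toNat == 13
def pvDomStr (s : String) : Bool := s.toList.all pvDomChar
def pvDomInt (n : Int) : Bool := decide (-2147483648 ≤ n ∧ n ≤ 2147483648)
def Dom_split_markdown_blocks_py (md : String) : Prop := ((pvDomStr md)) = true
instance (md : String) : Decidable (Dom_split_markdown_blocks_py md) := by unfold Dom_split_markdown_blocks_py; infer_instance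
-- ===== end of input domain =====

-- B replaces A's single line-by-line state machine by segment partitioning + per-segment heading splitting (alternative decomposition, same cost).

-- primitive line tests and block finisher (both Pythons compute these same expressions)
def pvFence (l : List Char) : Bool := PySem.Chars.startswith (PySem.Chars.strip l) "```".toList

def pvHead (l : List Char) : Bool :=
  PySem.Chars.startswith l "# ".toList || PySem.Chars.startswith l "## ".toList ||
    PySem.Chars.startswith l "### ".toList

def pvFlush (buf : List (List Char)) : List Char := PySem.Chars.strip (PySem.Chars.join ['\n'] buf)

-- ===== PORT A =====
def pvStepA (st : List (List Char) × List (List Char) × Bool × List Char) (l : List Char) :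
    List (List Char) × List (List Char) × Bool × List Char :=
  match st with
  | (blocks, buf, inCode, fence) =>
    if pvFence l then
      if !inCode then
        ((if buf.isEmpty then blocks else blocks ++ [pvFlush buf]), [l], true, PySem.Chars.strip l)
      else
        (blocks ++ [pvFlush (buf ++ [l])], [], false, [])
    else if !inCode && pvHead l then
      ((if buf.isEmpty then blocks else blocks ++ [pvFlush buf]), [l], inCode, fence)
    else
      (blocks, buf ++ [l], inCode, fence)

def split_markdown_blocks_py (md : String) : List String :=
  if md.toList = [] then []
  else
    let lines := PySem.Chars.splitlines md.toList
    let st := lines.foldl pvStepA ([], [], false, [])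
    let blocks := if st.2.1.isEmpty then st.1 else st.1 ++ [pvFlush st.2.1]
    (blocks.filter (fun b => !b.isEmpty)).map (fun b => String.ofList b)

-- ===== PORT B =====
-- scan forward to the first fence line (the inner `while j < n and not is_fence(...)` loops of Source B)
def pvTakeText : List (List Char) → List (List Char) × List (List Char)
  | [] => ([], [])
  | l :: ls =>
    if pvFence l then ([], l :: ls)
    else
      let p := pvTakeText ls
      (l :: p.1, p.2)

theorem pvTakeText_snd_length (ls : List (List Char)) : (pvTakeText ls).2.length ≤ ls.length := by
  induction ls with
  | nil => simp [pvTakeText]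
  | cons l ls ih =>
    simp only [pvTakeText]
    split
    · simp
    · simpa using Nat.le_succ_of_le ih

-- phase 1: maximal (isCode, lines) segments
def pvSegments : List (List Char) → List (Bool × List (List Char))
  | [] => []
  | l :: ls =>
    if pvFence l then
      match h : (pvTakeText ls).2 with
      | [] => [(true, l :: (pvTakeText ls).1)]
      | r :: rs => (true, l :: ((pvTakeText ls).1 ++ [r])) :: pvSegments rs
    else
      (false, l :: (pvTakeText ls).1) :: pvSegments (pvTakeText ls).2
termination_by ls => ls.length
decreasing_by
  · have := pvTakeText_snd_length ls
    rw [h] at this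
    simp only [List.length_cons] at this ⊢
    omega
  · have := pvTakeText_snd_length ls
    simp only [List.length_cons]
    omega

-- phase 2: split one text segment at headings
def pvHeadStep (st : List (List (List Char)) × List (List Char)) (l : List Char) :
    List (List (List Char)) × List (List Char) :=
  if pvHead l && !st.2.isEmpty then (st.1 ++ [st.2], [l]) else (st.1, st.2 ++ [l])

def pvSplitHeads (seg : List (List Char)) : List (List (List Char)) :=
  let st := seg.foldl pvHeadStep ([], [])
  if st.2.isEmpty then st.1 else st.1 ++ [st.2]

def split_markdown_blocks_py_alt (md : String) : List String :=
  if md.toList = [] then []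
  else
    let segs := pvSegments (PySem.Chars.splitlines md.toList)
    let cands := segs.foldl (fun acc s => if s.1 then acc ++ [s.2] else acc ++ pvSplitHeads s.2) []
    ((cands.map pvFlush).filter (fun b => !b.isEmpty)).map (fun b => String.ofList b)

-- ===== PRECONDITION & SPEC =====
def Spec_split_markdown_blocks_py (md : String) (out : List String) : Prop := out = split_markdown_blocks_py_alt md
instance (md : String) (out : List String) : Decidable (Spec_split_markdown_blocks_py md out) := by unfold Spec_split_markdown_blocks_py; infer_instance

-- ===== CLAIM (what is proved, stated in full; the proofs are below) =====
def Claim_equal_split_markdown_blocks_py : Prop := ∀ (md : String), Dom_split_markdown_blocks_py md → Spec_split_markdown_blocks_py md (split_markdown_blocks_py md)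

-- ===== LEMMAS AND PROOFS =====

def pvFinish (st : List (List Char) × List (List Char) × Bool × List Char) : List (List Char) :=
  if st.2.1.isEmpty then st.1 else st.1 ++ [pvFlush st.2.1]

def pvCandsOf (segs : List (Bool × List (List Char))) : List (List (List Char)) :=
  segs.flatMap (fun s => if s.1 then [s.2] else pvSplitHeads s.2)

theorem pv_candsFold (segs : List (Bool × List (List Char))) (acc : List (List (List Char))) :
    segs.foldl (fun acc s => if s.1 then acc ++ [s.2] else acc ++ pvSplitHeads s.2) acc
      = acc ++ pvCandsOf segs := by
  induction segs generalizing acc with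
  | nil => simp [pvCandsOf]
  | cons s segs ih =>
    simp only [List.foldl_cons, pvCandsOf, List.flatMap_cons]
    rw [ih]
    split <;> simp [pvCandsOf]

theorem pvTakeText_append (ls : List (List Char)) : (pvTakeText ls).1 ++ (pvTakeText ls).2 = ls := by
  induction ls with
  | nil => simp [pvTakeText]
  | cons l ls ih =>
    simp only [pvTakeText]
    split
    · simp
    · simpa using ih

theorem pvTakeText_fst_all (ls : List (List Char)) :
    ∀ x ∈ (pvTakeText ls).1, pvFence x = false := by
  induction ls with
  | nil => simp [pvTakeText]
  | cons l ls ih =>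
    simp only [pvTakeText]
    split
    · simp
    · rename_i h
      intro x hx
      simp only [List.mem_cons] at hx
      rcases hx with rfl | hx
      · simpa using h
      · exact ih x hx

theorem pvTakeText_snd_head (ls : List (List Char)) (r : List Char) (rs : List (List Char))
    (h : (pvTakeText ls).2 = r :: rs) : pvFence r = true := by
  induction ls with
  | nil => simp [pvTakeText] at h
  | cons l ls ih =>
    simp only [pvTakeText] at h
    split at h
    · rename_i hf
      simp only [List.cons.injEq] at h
      exact h.1 ▸ hf
    · exact ih h

-- unfolding equations for pvSegments
theorem pvSegments_nil : pvSegments [] = [] := by rw [pvSegments]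

theorem pvSegments_fence_open (l : List Char) (ls : List (List Char)) (hf : pvFence l = true)
    (h : (pvTakeText ls).2 = []) : pvSegments (l :: ls) = [(true, l :: (pvTakeText ls).1)] := by
  rw [pvSegments, if_pos hf]
  split
  · rfl
  · rename_i r rs heq
    simp [h] at heq

theorem pvSegments_fence_closed (l : List Char) (ls : List (List Char)) (r : List Char)
    (rs : List (List Char)) (hf : pvFence l = true) (h : (pvTakeText ls).2 = r :: rs) :
    pvSegments (l :: ls) = (true, l :: ((pvTakeText ls).1 ++ [r])) :: pvSegments rs := by
  rw [pvSegments, if_pos hf]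
  split
  · rename_i heq
    simp [h] at heq
  · rename_i r' rs' heq
    rw [h] at heq
    injection heq with h1 h2
    subst h1; subst h2; rfl

theorem pvSegments_text (l : List Char) (ls : List (List Char)) (hf : pvFence l = false) :
    pvSegments (l :: ls) = (false, l :: (pvTakeText ls).1) :: pvSegments (pvTakeText ls).2 := by
  rw [pvSegments, if_neg (by simp [hf])]

-- acc-shift for the heading fold
theorem pv_headFold_shift (ls : List (List Char)) (a0 a1 : List (List (List Char))) (c : List (List Char)) :
    ls.foldl pvHeadStep (a0 ++ a1, c)
      = (a0 ++ (ls.foldl pvHeadStep (a1, c)).1, (ls.foldl pvHeadStep (a1, c)).2) := by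
  induction ls generalizing a1 c with
  | nil => simp
  | cons l ls ih =>
    simp only [List.foldl_cons, pvHeadStep]
    split
    · rw [show a0 ++ a1 ++ [c] = a0 ++ (a1 ++ [c]) by simp]
      exact ih (a1 ++ [c]) [l]
    · exact ih a1 (c ++ [l])

-- A over a run of non-fence lines = B's heading fold, with flushed accumulator
theorem pv_textRun (ls : List (List Char)) (hnf : ∀ l ∈ ls, pvFence l = false)
    (blocks : List (List Char)) (cur : List (List Char)) (f : List Char) :
    ls.foldl pvStepA (blocks, cur, false, f)
      = (blocks ++ ((ls.foldl pvHeadStep ([], cur)).1).map pvFlush,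
         (ls.foldl pvHeadStep ([], cur)).2, false, f) := by
  induction ls generalizing blocks cur with
  | nil => simp
  | cons l ls ih =>
    have hl : pvFence l = false := hnf l (by simp)
    have hrest : ∀ x ∈ ls, pvFence x = false := fun x hx => hnf x (by simp [hx])
    rw [List.foldl_cons, List.foldl_cons]
    by_cases hh : pvHead l = true
    · by_cases hc : cur = []
      · subst hc
        rw [show pvStepA (blocks, [], false, f) l = (blocks, [l], false, f) by
              simp [pvStepA, hl, hh],
            show pvHeadStep ([], ([] : List (List Char))) l = ([], [l]) by simp [pvHeadStep]]
        exact ih hrest blocks [l]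
      · rw [show pvStepA (blocks, cur, false, f) l = (blocks ++ [pvFlush cur], [l], false, f) by
              simp [pvStepA, hl, hh, hc],
            show pvHeadStep ([], cur) l = ([cur], [l]) by simp [pvHeadStep, hh, hc]]
        rw [ih hrest (blocks ++ [pvFlush cur]) [l]]
        rw [show ([cur] : List (List (List Char))) = [cur] ++ [] from (List.append_nil _).symm,
            pv_headFold_shift ls [cur] [] [l]]
        simp
    · rw [show pvStepA (blocks, cur, false, f) l = (blocks, cur ++ [l], false, f) by
            simp [pvStepA, hl, hh],
          show pvHeadStep ([], cur) l = ([], cur ++ [l]) by simp [pvHeadStep, hh]]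
      exact ih hrest blocks (cur ++ [l])

-- A inside a code block whose fence is never closed: everything joins the buffer
theorem pv_codeRun_open (ls : List (List Char)) (h : (pvTakeText ls).2 = []) :
    ∀ (bl bu : List (List Char)) (f : List Char),
    ls.foldl pvStepA (bl, bu, true, f) = (bl, bu ++ (pvTakeText ls).1, true, f) := by
  induction ls with
  | nil => intro bl bu f; simp [pvTakeText]
  | cons l ls ih =>
    intro bl bu f
    by_cases hf : pvFence l = true
    · rw [pvTakeText] at h
      rw [if_pos hf] at h
      simp at h
    · have hf' : pvFence l = false := by simpa using hf
      simp only [pvTakeText, hf', Bool.false_eq_true, if_false] at h ⊢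
      rw [List.foldl_cons,
          show pvStepA (bl, bu, true, f) l = (bl, bu ++ [l], true, f) by simp [pvStepA, hf']]
      rw [ih h bl (bu ++ [l]) f]
      simp

-- A inside a code block with a closing fence: flush through it and continue clean
theorem pv_codeRun_closed (ls : List (List Char)) (r : List Char) (rs : List (List Char))
    (h : (pvTakeText ls).2 = r :: rs) : ∀ (bl bu : List (List Char)) (f : List Char),
    ls.foldl pvStepA (bl, bu, true, f)
      = rs.foldl pvStepA (bl ++ [pvFlush (bu ++ (pvTakeText ls).1 ++ [r])], [], false, []) := by
  induction ls with
  | nil => simp [pvTakeText] at h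
  | cons l ls ih =>
    intro bl bu f
    by_cases hf : pvFence l = true
    · rw [pvTakeText] at h ⊢
      rw [if_pos hf] at h ⊢
      injection h with h1 h2
      subst h1; subst h2
      rw [List.foldl_cons,
          show pvStepA (bl, bu, true, f) l = (bl ++ [pvFlush (bu ++ [l])], [], false, []) by
            simp [pvStepA, hf]]
      simp
    · have hf' : pvFence l = false := by simpa using hf
      simp only [pvTakeText, hf', Bool.false_eq_true, if_false] at h ⊢
      rw [List.foldl_cons,
          show pvStepA (bl, bu, true, f) l = (bl, bu ++ [l], true, f) by simp [pvStepA, hf']]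
      rw [ih h bl (bu ++ [l]) f]
      simp

-- main invariant: from a clean state (empty buffer, not in code), A's finished block
-- list is exactly B's candidate list, flushed
theorem pv_key : ∀ (n : Nat) (ls : List (List Char)), ls.length ≤ n →
    ∀ (blocks : List (List Char)) (f : List Char),
    pvFinish (ls.foldl pvStepA (blocks, [], false, f))
      = blocks ++ (pvCandsOf (pvSegments ls)).map pvFlush := by
  intro n
  induction n with
  | zero =>
    intro ls hls blocks f
    have h0 : ls = [] := List.eq_nil_of_length_eq_zero (Nat.le_zero.mp hls)
    subst h0
    simp [pvFinish, pvCandsOf, pvSegments_nil]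
  | succ n ih =>
    intro ls hls blocks f
    cases ls with
    | nil => simp [pvFinish, pvCandsOf, pvSegments_nil]
    | cons l ls' =>
      have hn : ls'.length ≤ n := by simp at hls; omega
      by_cases hf : pvFence l = true
      · rw [List.foldl_cons,
            show pvStepA (blocks, [], false, f) l = (blocks, [l], true, PySem.Chars.strip l) by
              simp [pvStepA, hf]]
        cases h2 : (pvTakeText ls').2 with
        | nil =>
          rw [pv_codeRun_open ls' h2 blocks [l] _]
          rw [pvSegments_fence_open l ls' hf h2]
          simp [pvFinish, pvCandsOf]
        | cons r rs =>
          have hrs : rs.length ≤ n := by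
            have := pvTakeText_snd_length ls'
            rw [h2] at this
            simp at this
            omega
          rw [pv_codeRun_closed ls' r rs h2 blocks [l] _]
          rw [ih rs hrs _ []]
          rw [pvSegments_fence_closed l ls' r rs hf h2]
          simp [pvCandsOf]
      · have hf' : pvFence l = false := by simpa using hf
        have hsplit : List.foldl pvStepA (blocks, [], false, f) (l :: ls')
            = List.foldl pvStepA
                (List.foldl pvStepA (blocks, [], false, f) (l :: (pvTakeText ls').1))
                ((pvTakeText ls').2) := by
          rw [← List.foldl_append, List.cons_append, pvTakeText_append]
        rw [hsplit]
        rw [pv_textRun (l :: (pvTakeText ls').1)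
              (by
                intro x hx
                simp only [List.mem_cons] at hx
                rcases hx with rfl | hx
                · exact hf'
                · exact pvTakeText_fst_all ls' x hx)
              blocks [] f]
        set H := (l :: (pvTakeText ls').1).foldl pvHeadStep ([], []) with hH
        rw [pvSegments_text l ls' hf']
        cases h2 : (pvTakeText ls').2 with
        | nil =>
          rw [pvSegments_nil]
          simp only [List.foldl_nil, pvCandsOf, List.flatMap_cons, List.flatMap_nil,
            List.append_nil, Bool.false_eq_true, if_false, pvSplitHeads, ← hH]
          by_cases hc : H.2.isEmpty <;>
            simp [pvFinish, hc, List.map_append]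
        | cons r rs =>
          have hr : pvFence r = true := pvTakeText_snd_head ls' r rs h2
          rw [List.foldl_cons,
              show pvStepA (blocks ++ H.1.map pvFlush, H.2, false, f) r
                  = ((if H.2.isEmpty then blocks ++ H.1.map pvFlush
                      else blocks ++ H.1.map pvFlush ++ [pvFlush H.2]),
                     [r], true, PySem.Chars.strip r) by
                simp [pvStepA, hr]]
          have hrsn : rs.length ≤ n := by
            have := pvTakeText_snd_length ls'
            rw [h2] at this
            simp at this
            omega
          cases h3 : (pvTakeText rs).2 with
          | nil =>
            rw [pv_codeRun_open rs h3 _ [r] _]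
            rw [pvSegments_fence_open r rs hr h3]
            simp only [pvCandsOf, List.flatMap_cons, List.flatMap_nil, List.append_nil,
              Bool.false_eq_true, if_false, if_pos, pvSplitHeads, ← hH]
            by_cases hc : H.2.isEmpty <;>
              simp [pvFinish, hc, List.map_append]
          | cons r2 rs2 =>
            have hrs2 : rs2.length ≤ n := by
              have := pvTakeText_snd_length rs
              rw [h3] at this
              simp at this
              omega
            rw [pv_codeRun_closed rs r2 rs2 h3 _ [r] _]
            rw [ih rs2 hrs2 _ []]
            rw [pvSegments_fence_closed r rs r2 rs2 hr h3]
            simp only [pvCandsOf, List.flatMap_cons, Bool.false_eq_true, if_false, if_pos,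
              pvSplitHeads, ← hH]
            by_cases hc : H.2.isEmpty <;>
              simp [hc, List.map_append, List.append_assoc]

-- ===== VERDICT (by name: the statement is the Claim_ definition above) =====
theorem split_markdown_blocks_py_spec : Claim_equal_split_markdown_blocks_py := by
  intro md _
  unfold Spec_split_markdown_blocks_py split_markdown_blocks_py split_markdown_blocks_py_alt
  by_cases h : md.toList = []
  · simp [h]
  · simp only [h, if_false]
    rw [pv_candsFold _ []]
    have hk := pv_key (PySem.Chars.splitlines md.toList).length (PySem.Chars.splitlines md.toList)
      le_rfl [] []
    unfold pvFinish at hk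
    simp only [List.nil_append] at hk
    rw [hk]
    simp
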